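-- pv_equiv track=rewrite | github.com/K-dash/pyropust | tools/check_type_modes.py | _mode1
-- ===== SOURCE A (Python) =====
-- def _mode1(text: str) -> str:
--     # Replace Ok overloads / signature with E-generic Ok.
--     lines: list[str] = []
--     src = text.splitlines()
--     i = 0
--     while i < len(src):
--         line = src[i]
--         if line.lstrip().startswith("@overload"):
--             # Skip @overload if next non-empty line is def Ok
--             j = i + 1
--             while j < len(src) and src[j].strip() == "":
--                 j += 1
--             if j < len(src) and src[j].lstrip().startswith("def Ok"):
--                 i += 1
--                 continue
--         if line.lstrip().startswith("def Ok"):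
--             lines.append("def Ok[T, E](value: T) -> Result[T, E]: ...")
--             i += 1
--             continue
--         lines.append(line)
--         i += 1
--     return "\n".join(lines) + "\n"
-- ===== SOURCE B (Python) =====
-- def _mode1(text: str) -> str:
--     # Reverse single pass carrying one flag: whether the closest later non-blank line defines Ok.
--     out: list[str] = []
--     flag = False
--     for line in reversed(text.splitlines()):
--         s = line.lstrip()
--         if s.startswith("def Ok"):
--             out.append("def Ok[T, E](value: T) -> Result[T, E]: ...")
--         elif s.startswith("@overload") and flag:
--             pass
--         else:
--             out.append(line)
--         if line.strip() != "":
--             flag = s.startswith("def Ok")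
--     out.reverse()
--     return "\n".join(out) + "\n"
-- ===== Notes on version B (the rewrite author's own statement) =====
-- stated objective: alternative
-- what changed: B scans the lines in reverse with a single carried boolean recording whether the closest later non-blank line defines Ok, eliminating A's inner forward lookahead loop over blank lines.
import Mathlib
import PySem

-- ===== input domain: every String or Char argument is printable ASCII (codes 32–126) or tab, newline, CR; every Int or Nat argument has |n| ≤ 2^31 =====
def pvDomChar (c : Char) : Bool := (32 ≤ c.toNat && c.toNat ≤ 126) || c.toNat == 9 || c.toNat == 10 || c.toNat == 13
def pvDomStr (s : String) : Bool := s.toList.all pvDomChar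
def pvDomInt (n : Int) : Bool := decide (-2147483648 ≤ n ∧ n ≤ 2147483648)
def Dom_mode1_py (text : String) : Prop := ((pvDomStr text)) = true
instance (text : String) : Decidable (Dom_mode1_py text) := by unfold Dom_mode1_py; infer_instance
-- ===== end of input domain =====

-- B replaces A's forward scan with inner lookahead by a single reverse pass carrying one boolean flag (alternative decomposition, same cost).

-- ===== PORT A =====
-- literals shared by both ports
def pvOverload : List Char := ['@','o','v','e','r','l','o','a','d']
def pvDefOk : List Char := ['d','e','f',' ','O','k']
def pvRepl : List Char :=
  ['d','e','f',' ','O','k','[','T',',',' ','E',']','(','v','a','l','u','e',':',' ','T',')',' ','-','>',' ','R','e','s','u','l','t','[','T',',',' ','E',']',':',' ','.','.','.']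

-- inner 'while j < len(src) and src[j].strip() == ""' lookahead: first line with non-empty strip
def pvSkipEmpty : List (List Char) → Option (List Char)
  | [] => none
  | l :: rest => if PySem.Chars.strip l == ([] : List Char) then pvSkipEmpty rest else some l

-- result of the lookahead: whether the next non-empty line defines Ok
def pvFlagOf (src : List (List Char)) : Bool :=
  match pvSkipEmpty src with
  | some l => PySem.Chars.startswith (PySem.Chars.lstrip l) pvDefOk
  | none => false

-- the outer while-loop of A, one step per index i
def pvALoop : List (List Char) → List (List Char)
  | [] => []
  | line :: rest =>
    if PySem.Chars.startswith (PySem.Chars.lstrip line) pvOverload && pvFlagOf rest then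
      pvALoop rest
    else if PySem.Chars.startswith (PySem.Chars.lstrip line) pvDefOk then
      pvRepl :: pvALoop rest
    else
      line :: pvALoop rest

def mode1_py (text : String) : String :=
  String.ofList (PySem.Chars.join ['\n'] (pvALoop (PySem.Chars.splitlines text.toList)) ++ ['\n'])

-- ===== PORT B =====
-- one step of B's loop over reversed(src): state (out, flag)
def pvBStep (st : List (List Char) × Bool) (line : List Char) : List (List Char) × Bool :=
  let s := PySem.Chars.lstrip line
  let out :=
    if PySem.Chars.startswith s pvDefOk then st.1 ++ [pvRepl]
    else if PySem.Chars.startswith s pvOverload && st.2 then st.1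
    else st.1 ++ [line]
  let flag := if PySem.Chars.strip line ≠ ([] : List Char) then PySem.Chars.startswith s pvDefOk else st.2
  (out, flag)

def mode1_py_alt (text : String) : String :=
  let st := ((PySem.Chars.splitlines text.toList).reverse).foldl pvBStep ([], false)
  String.ofList (PySem.Chars.join ['\n'] st.1.reverse ++ ['\n'])

-- ===== PRECONDITION & SPEC =====
def Spec_mode1_py (text : String) (out : String) : Prop := out = mode1_py_alt text
instance (text : String) (out : String) : Decidable (Spec_mode1_py text out) := by unfold Spec_mode1_py; infer_instance

-- ===== CLAIM (what is proved, stated in full; the proofs are below) =====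
def Claim_equal_mode1_py : Prop := ∀ (text : String), Dom_mode1_py text → Spec_mode1_py text (mode1_py text)

-- ===== LEMMAS AND PROOFS =====

theorem pv_not_both (s : List Char)
    (h1 : PySem.Chars.startswith s pvOverload = true)
    (h2 : PySem.Chars.startswith s pvDefOk = true) : False := by
  rw [PySem.Chars.startswith_iff] at h1 h2
  rcases h1 with ⟨t1, e1⟩
  rcases h2 with ⟨t2, e2⟩
  rw [← e1] at e2
  simp [pvOverload, pvDefOk] at e2

-- flag recurrence: B's update matches the lookahead on the extended list
theorem pvFlagOf_cons (line : List Char) (rest : List (List Char)) :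
    pvFlagOf (line :: rest) =
      (if PySem.Chars.strip line ≠ ([] : List Char)
       then PySem.Chars.startswith (PySem.Chars.lstrip line) pvDefOk
       else pvFlagOf rest) := by
  by_cases h : PySem.Chars.strip line = ([] : List Char)
  · simp [pvFlagOf, pvSkipEmpty, h]
  · simp [pvFlagOf, pvSkipEmpty, h]

-- main invariant: B's fold over the reversed list computes A's output (reversed) and the flag
theorem pv_fold_eq (src : List (List Char)) :
    src.reverse.foldl pvBStep ([], false) = ((pvALoop src).reverse, pvFlagOf src) := by
  induction src with
  | nil => simp [pvALoop, pvFlagOf, pvSkipEmpty]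
  | cons line rest ih =>
    have : (line :: rest).reverse.foldl pvBStep ([], false)
        = pvBStep (rest.reverse.foldl pvBStep ([], false)) line := by
      simp [List.foldl_append]
    rw [this, ih, pvFlagOf_cons]
    by_cases hdef : PySem.Chars.startswith (PySem.Chars.lstrip line) pvDefOk = true
    · have hov : PySem.Chars.startswith (PySem.Chars.lstrip line) pvOverload = false := by
        by_contra h
        exact pv_not_both _ (by simpa using h) hdef
      simp [pvBStep, pvALoop, hdef, hov]
    · by_cases hov : PySem.Chars.startswith (PySem.Chars.lstrip line) pvOverload = true
      · by_cases hf : pvFlagOf rest = true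
        · simp [pvBStep, pvALoop, hdef, hov, hf]
        · simp [pvBStep, pvALoop, hdef, hov, hf]
      · simp [pvBStep, pvALoop, hdef, hov]

-- ===== VERDICT (by name: the statement is the Claim_ definition above) =====
theorem mode1_py_spec : Claim_equal_mode1_py := by
  intro text _
  unfold Spec_mode1_py mode1_py mode1_py_alt
  rw [pv_fold_eq]
  simp
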